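-- pv_equiv track=rewrite | github.com/thevillagegreen/librarychecker | album_checks.py | tracks_continuous
-- ===== SOURCE A (Python) =====
-- def tracks_continuous(flac, tracks):
--   if flac and tracks:
--     for disc in tracks:
--         if disc: #TO DO: This does account for the first or last track missing
--           range_list =list(range(min(disc), max(disc)+1))
--           if range_list != sorted(disc):
--             return "AlbumNoncon"
--
--   elif flac and not tracks:
--     return "AlbumNoInfo"
-- ===== SOURCE B (Python) =====
-- def tracks_continuous(flac, tracks):
--   if not flac:
--     return None
--   if not tracks:
--     return "AlbumNoInfo"
--   def disc_ok(disc):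
--     if not disc:
--       return True
--     lo, hi = min(disc), max(disc)
--     return len(set(disc)) == len(disc) and hi - lo + 1 == len(disc)
--   if all(disc_ok(d) for d in tracks):
--     return None
--   return "AlbumNoncon"
-- ===== Notes on version B (the rewrite author's own statement) =====
-- stated objective: simpler
-- what changed: Early-return guard chain plus a boolean per-disc predicate tested with all(): each disc is judged arithmetically (distinct count and max-min+1 == len) instead of materializing range(min,max+1) and comparing it with sorted(disc), removing the sort, the range list and the early-return loop.
import Mathlib
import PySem

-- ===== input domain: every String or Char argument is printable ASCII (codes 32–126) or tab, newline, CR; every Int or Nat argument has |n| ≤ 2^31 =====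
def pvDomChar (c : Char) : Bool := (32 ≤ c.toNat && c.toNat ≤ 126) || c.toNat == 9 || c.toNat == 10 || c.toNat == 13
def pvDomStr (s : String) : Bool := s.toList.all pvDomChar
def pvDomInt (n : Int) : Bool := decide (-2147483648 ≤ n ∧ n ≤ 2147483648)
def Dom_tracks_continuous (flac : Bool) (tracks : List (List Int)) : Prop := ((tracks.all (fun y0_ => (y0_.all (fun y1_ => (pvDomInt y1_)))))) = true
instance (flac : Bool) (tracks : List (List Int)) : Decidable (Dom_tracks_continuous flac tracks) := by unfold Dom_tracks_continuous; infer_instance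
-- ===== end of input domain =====

-- B: early-return guard chain and an all()-tested boolean per-disc predicate that decides
-- contiguity arithmetically (distinct count and max-min+1 = len), no sort or range list (objective: simpler).

-- ===== PORT A =====
-- the 'for disc in tracks: …' loop with its early return
def tcLoopA : List (List Int) → Option String
  | [] => none
  | disc :: rest =>
    if !disc.isEmpty then
      match PySem.List.min? disc (fun x => x), PySem.List.max? disc (fun x => x) with
      | some lo, some hi =>
        let range_list := PySem.List.pyRange lo (hi + 1) 1
        if range_list ≠ PySem.List.sorted disc (fun x => x) false then some "AlbumNoncon"
        else tcLoopA rest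
      | _, _ => tcLoopA rest   -- unreachable: disc is nonempty
    else tcLoopA rest

def tracks_continuous (flac : Bool) (tracks : List (List Int)) : Option String :=
  if flac && !tracks.isEmpty then tcLoopA tracks
  else if flac && tracks.isEmpty then some "AlbumNoInfo"
  else none

-- ===== PORT B =====
-- Source B's inner 'disc_ok' predicate
def discOk (disc : List Int) : Bool :=
  if disc.isEmpty then true
  else
    match PySem.List.min? disc (fun x => x), PySem.List.max? disc (fun x => x) with
    | some lo, some hi =>
      decide ((PySem.Set.ofList disc).length = disc.length) &&
      decide (hi - lo + 1 = (disc.length : Int))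
    | _, _ => true   -- unreachable: disc is nonempty

def tracks_continuous_alt (flac : Bool) (tracks : List (List Int)) : Option String :=
  if !flac then none
  else if tracks.isEmpty then some "AlbumNoInfo"
  else if tracks.all discOk then none
  else some "AlbumNoncon"

-- ===== PRECONDITION & SPEC =====
def Spec_tracks_continuous (flac : Bool) (tracks : List (List Int)) (out : Option String) : Prop := out = tracks_continuous_alt flac tracks
instance (flac : Bool) (tracks : List (List Int)) (out : Option String) : Decidable (Spec_tracks_continuous flac tracks out) := by unfold Spec_tracks_continuous; infer_instance

-- ===== CLAIM (what is proved, stated in full; the proofs are below) =====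
def Claim_equal_tracks_continuous : Prop := ∀ (flac : Bool) (tracks : List (List Int)), Dom_tracks_continuous flac tracks → Spec_tracks_continuous flac tracks (tracks_continuous flac tracks)

-- ===== LEMMAS AND PROOFS =====

-- set(xs) (in insertion order) is a sublist of xs
theorem ofList_aux_sublist {α : Type} [BEq α] (xs : List α) : ∀ (s : List α),
    List.Sublist (xs.foldl PySem.Set.add s) (s ++ xs) := by
  induction xs with
  | nil => intro s; simp
  | cons x xs ih =>
    intro s
    have h1 : List.Sublist (xs.foldl PySem.Set.add (PySem.Set.add s x)) ((PySem.Set.add s x) ++ xs) := ih _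
    have h2 : List.Sublist (PySem.Set.add s x) (s ++ [x]) := by
      unfold PySem.Set.add; split
      · exact List.sublist_append_left s [x]
      · exact List.Sublist.refl _
    have h3 : List.Sublist ((PySem.Set.add s x) ++ xs) ((s ++ [x]) ++ xs) := h2.append_right xs
    have := h1.trans h3
    simpa using this

theorem ofList_sublist {α : Type} [BEq α] (xs : List α) : List.Sublist (PySem.Set.ofList xs) xs :=
  ofList_aux_sublist xs []

theorem nodup_of_ofList_length {α : Type} [BEq α] [LawfulBEq α] (xs : List α)
    (h : (PySem.Set.ofList xs).length = xs.length) : xs.Nodup := by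
  have heq := (ofList_sublist xs).eq_of_length h
  exact heq ▸ PySem.Set.nodup_ofList xs

theorem foldl_add_of_nodup {α : Type} [BEq α] [LawfulBEq α] (xs : List α) : ∀ (s : List α),
    (s ++ xs).Nodup → xs.foldl PySem.Set.add s = s ++ xs := by
  induction xs with
  | nil => intro s _; simp
  | cons x xs ih =>
    intro s hs
    have hx : x ∉ s := fun hmem => (List.disjoint_of_nodup_append hs) hmem (List.mem_cons_self)
    have hadd : PySem.Set.add s x = s ++ [x] := by
      simp [PySem.Set.add, hx]
    have hstep : (x :: xs).foldl PySem.Set.add s = xs.foldl PySem.Set.add (s ++ [x]) := by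
      simp [List.foldl_cons, hadd]
    rw [hstep, ih (s ++ [x]) (by simpa using hs)]
    simp

theorem ofList_eq_self_of_nodup {α : Type} [BEq α] [LawfulBEq α] (xs : List α)
    (h : xs.Nodup) : PySem.Set.ofList xs = xs := by
  have := foldl_add_of_nodup xs [] (by simpa using h)
  simpa using this

-- the heart: A's per-disc range/sorted comparison agrees with B's arithmetic test
theorem disc_condition (disc : List Int) (lo hi : Int)
    (hlo : PySem.List.min? disc (fun x => x) = some lo)
    (hhi : PySem.List.max? disc (fun x => x) = some hi) :
    (PySem.List.pyRange lo (hi + 1) 1 = PySem.List.sorted disc (fun x => x) false)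
      ↔ ((PySem.Set.ofList disc).length = disc.length ∧ hi - lo + 1 = (disc.length : Int)) := by
  have hhimem : hi ∈ disc := PySem.List.max?_mem hhi
  have hmin : ∀ y ∈ disc, lo ≤ y := PySem.List.min?_isMin hlo
  have hmax : ∀ y ∈ disc, y ≤ hi := PySem.List.max?_isMax hhi
  have hlohi : lo ≤ hi := hmin hi hhimem
  constructor
  · intro h
    have hperm : (PySem.List.pyRange lo (hi + 1) 1).Perm disc := by
      rw [h]; exact PySem.List.sorted_perm disc _ _
    have hnd : disc.Nodup := hperm.nodup_iff.mp (PySem.List.nodup_pyRange_one lo (hi + 1))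
    have hlen : (PySem.List.pyRange lo (hi + 1) 1).length = disc.length := hperm.length_eq
    rw [PySem.List.length_pyRange_one] at hlen
    refine ⟨by rw [ofList_eq_self_of_nodup disc hnd], ?_⟩
    omega
  · rintro ⟨hset, hlen⟩
    have hnd : disc.Nodup := nodup_of_ofList_length disc hset
    have htf : disc.toFinset = Finset.Icc lo hi := by
      apply Finset.eq_of_subset_of_card_le
      · intro x hx
        rw [List.mem_toFinset] at hx
        exact Finset.mem_Icc.mpr ⟨hmin x hx, hmax x hx⟩
      · rw [List.toFinset_card_of_nodup hnd, Int.card_Icc]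
        omega
    have hperm : (PySem.List.pyRange lo (hi + 1) 1).Perm disc := by
      apply List.perm_of_nodup_nodup_toFinset_eq (PySem.List.nodup_pyRange_one lo (hi + 1)) hnd
      rw [htf]
      ext x
      simp [PySem.List.mem_pyRange_one, Finset.mem_Icc]
    exact (PySem.List.sorted_eq_of_perm_of_pairwise_lt disc _ _ hperm
      (PySem.List.pairwise_lt_pyRange_one lo (hi + 1))).symm

-- A's early-return loop equals B's all()-test
theorem loop_eq_all (tracks : List (List Int)) :
    tcLoopA tracks = (if tracks.all discOk then none else some "AlbumNoncon") := by
  induction tracks with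
  | nil => rfl
  | cons disc rest ih =>
    unfold tcLoopA
    by_cases hne : disc.isEmpty
    · simp [hne, ih, List.all_cons, discOk]
    · simp only [hne, Bool.not_false, if_pos]
      cases hlo : PySem.List.min? disc (fun x => x) with
      | none =>
        cases hhi : PySem.List.max? disc (fun x => x) <;>
          simp [ih, List.all_cons, discOk, hne, hlo, hhi]
      | some lo =>
        cases hhi : PySem.List.max? disc (fun x => x) with
        | none => simp [ih, List.all_cons, discOk, hne, hlo, hhi]
        | some hi =>
          simp only
          have hiff := disc_condition disc lo hi hlo hhi
          by_cases hc : PySem.List.pyRange lo (hi + 1) 1 = PySem.List.sorted disc (fun x => x) false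
          · obtain ⟨h1, h2⟩ := hiff.mp hc
            simp [hc, ih, List.all_cons, discOk, hne, hlo, hhi, h1, h2]
          · have hd : ¬ ((PySem.Set.ofList disc).length = disc.length ∧ hi - lo + 1 = (disc.length : Int)) :=
              fun h => hc (hiff.mpr h)
            rw [Classical.not_and_iff_not_or_not] at hd
            rcases hd with hd | hd <;>
              simp [hc, List.all_cons, discOk, hne, hlo, hhi, hd]

-- ===== VERDICT (by name: the statement is the Claim_ definition above) =====
theorem tracks_continuous_spec : Claim_equal_tracks_continuous := by
  intro flac tracks _
  unfold Spec_tracks_continuous tracks_continuous tracks_continuous_alt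
  cases flac with
  | false => simp
  | true =>
    by_cases he : tracks.isEmpty
    · simp [he]
    · simp [he, loop_eq_all]
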